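-- pv_equiv track=rewrite | github.com/boraxpr/bitesofpy | 115/indents.py | count_indents
-- ===== SOURCE A (Python) =====
-- def count_indents(text):
--     """Takes a string and counts leading white spaces, return int count"""
--     counts = 0
--     for char in text:
--         if char.isspace() and char != "\t" and char !="\n":
--             counts += 1
--         elif char.isalpha():
--             break
--     return counts
-- ===== SOURCE B (Python) =====
-- def count_indents(text):
--     """Takes a string and counts leading white spaces, return int count"""
--     cut = next((i for i, c in enumerate(text) if c.isalpha()), len(text))
--     return sum(1 for c in text[:cut] if c.isspace() and c != "\t" and c != "\n")
-- ===== Notes on version B (the rewrite author's own statement) =====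
-- stated objective: simpler
-- what changed: Replaces the counting loop with an in-loop break by a locate-then-tally decomposition: find the index of the first alphabetic character (defaulting to len(text)), then count the qualifying whitespace characters in that prefix with a generator-sum.
import Mathlib
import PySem

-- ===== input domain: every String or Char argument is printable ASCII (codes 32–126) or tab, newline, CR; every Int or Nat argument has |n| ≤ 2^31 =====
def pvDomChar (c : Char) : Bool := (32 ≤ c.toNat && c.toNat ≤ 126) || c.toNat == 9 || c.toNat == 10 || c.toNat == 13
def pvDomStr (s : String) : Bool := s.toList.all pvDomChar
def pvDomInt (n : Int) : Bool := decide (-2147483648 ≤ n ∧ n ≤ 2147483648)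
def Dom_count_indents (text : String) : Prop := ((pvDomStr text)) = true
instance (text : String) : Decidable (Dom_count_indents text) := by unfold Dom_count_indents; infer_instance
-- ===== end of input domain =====

-- B replaces A's counting loop with break by locate-first-alpha then tally the prefix (simpler decomposition).


-- ===== PORT A =====
-- loop over the characters with a running counter; `break` on the first alphabetic char
def countIndentsGoA : List Char → Int → Int
  | [], counts => counts
  | c :: rest, counts =>
    if PySem.Chars.isspace c && c != '\t' && c != '\n' then
      countIndentsGoA rest (counts + 1)
    else if PySem.Chars.isalpha c then
      counts
    else
      countIndentsGoA rest counts

def count_indents (text : String) : Int := countIndentsGoA text.toList 0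

-- ===== PORT B =====
-- locate the first alphabetic character (default: length), then tally the qualifying whitespace in that prefix
def count_indents_alt (text : String) : Int :=
  let cs := text.toList
  let cut := cs.findIdx (fun c => PySem.Chars.isalpha c)
  ((cs.take cut).countP (fun c => PySem.Chars.isspace c && c != '\t' && c != '\n') : Int)

-- ===== PRECONDITION & SPEC =====
def Spec_count_indents (text : String) (out : Int) : Prop := out = count_indents_alt text
instance (text : String) (out : Int) : Decidable (Spec_count_indents text out) := by unfold Spec_count_indents; infer_instance

-- ===== CLAIM (what is proved, stated in full; the proofs are below) =====
def Claim_equal_count_indents : Prop := ∀ (text : String), Dom_count_indents text → Spec_count_indents text (count_indents text)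

-- ===== LEMMAS AND PROOFS =====
theorem pv_space_not_alpha (c : Char) (h : PySem.Chars.isspace c = true) :
    PySem.Chars.isalpha c = false := by
  simp only [PySem.Chars.isspace, PySem.Chars.isalpha, PySem.Chars.isupper, PySem.Chars.islower,
    Char.le_def, UInt32.le_iff_toNat_le, Char.toNat,
    show ('A').val.toNat = 65 from rfl, show ('Z').val.toNat = 90 from rfl,
    show ('a').val.toNat = 97 from rfl, show ('z').val.toNat = 122 from rfl,
    Bool.or_eq_true, Bool.and_eq_true, decide_eq_true_eq,
    Bool.or_eq_false_iff, Bool.and_eq_false_iff, decide_eq_false_iff_not] at *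
  omega

theorem pv_go_eq (l : List Char) (counts : Int) :
    countIndentsGoA l counts =
      counts + ((l.take (l.findIdx (fun c => PySem.Chars.isalpha c))).countP
        (fun c => PySem.Chars.isspace c && c != '\t' && c != '\n') : Int) := by
  induction l generalizing counts with
  | nil => simp [countIndentsGoA]
  | cons c rest ih =>
    rw [countIndentsGoA, List.findIdx_cons]
    by_cases ha : PySem.Chars.isalpha c = true
    · have hsp : ¬ (PySem.Chars.isspace c = true) := by
        intro hs; rw [pv_space_not_alpha c hs] at ha; exact Bool.false_ne_true ha
      simp [ha, hsp]
    · simp only [Bool.not_eq_true] at ha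
      by_cases hp : (PySem.Chars.isspace c && c != '\t' && c != '\n') = true
      · simp [ha, hp, ih]
        ring
      · simp only [Bool.not_eq_true] at hp
        simp [ha, hp, ih]

-- ===== VERDICT (by name: the statement is the Claim_ definition above) =====
theorem count_indents_spec : Claim_equal_count_indents := by
  intro text _
  unfold Spec_count_indents count_indents count_indents_alt
  simpa using pv_go_eq text.toList 0
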